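-- pv_equiv track=rewrite | github.com/Kindiras/ML_PINN_Pot- | DFT_extraction_PINN.py | findPositionForce
-- ===== SOURCE A (Python) =====
-- def findPositionForce(outcar):
--      begin = 0
--      ending = 0
--      pos = []
--      for lab1,line1 in enumerate(outcar):
--           if "TOTAL-FORCE" in line1:
--                begin = lab1 + 2
--      for lab2,line2 in enumerate(outcar):
--           if "total drift:" in line2:
--                ending = lab2 - 1
--      pos.append(begin)
--      pos.append(ending)
--      return(pos)
-- ===== SOURCE B (Python) =====
-- def findPositionForce(outcar):
--     begin = 0
--     ending = 0
--     found_begin = False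
--     found_ending = False
--     for i, line in reversed(list(enumerate(outcar))):
--         if not found_begin and "TOTAL-FORCE" in line:
--             begin = i + 2
--             found_begin = True
--         if not found_ending and "total drift:" in line:
--             ending = i - 1
--             found_ending = True
--         if found_begin and found_ending:
--             break
--     return [begin, ending]
-- ===== Notes on version B (the rewrite author's own statement) =====
-- stated objective: alternative
-- what changed: Replaces A's two full forward passes (last match wins) by one backward scan that records the first hit for each marker and breaks early once both are found.
import Mathlib
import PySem

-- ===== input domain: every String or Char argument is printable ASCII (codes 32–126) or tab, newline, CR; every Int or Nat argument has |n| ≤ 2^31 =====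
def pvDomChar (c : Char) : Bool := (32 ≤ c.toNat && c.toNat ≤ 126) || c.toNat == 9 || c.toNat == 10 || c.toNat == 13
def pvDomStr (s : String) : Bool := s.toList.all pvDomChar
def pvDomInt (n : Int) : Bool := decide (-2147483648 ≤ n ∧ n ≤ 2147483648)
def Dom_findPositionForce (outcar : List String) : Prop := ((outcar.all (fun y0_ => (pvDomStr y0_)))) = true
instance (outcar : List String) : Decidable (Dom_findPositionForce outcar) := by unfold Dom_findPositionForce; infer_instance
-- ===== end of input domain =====

-- B replaces A's two full forward passes (last match wins) by a single backward scan
-- that records the first hit for each marker and breaks early once both are found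
-- (objective: alternative decomposition, same asymptotic cost).

-- ===== PORT A =====
def findPositionForce (outcar : List String) : List Int :=
  let begin_ := (PySem.List.enumerate outcar).foldl
    (fun b p => if PySem.Str.isIn "TOTAL-FORCE" p.2 then p.1 + 2 else b) 0
  let ending := (PySem.List.enumerate outcar).foldl
    (fun e p => if PySem.Str.isIn "total drift:" p.2 then p.1 - 1 else e) 0
  [begin_, ending]

-- ===== PORT B =====
-- the loop body of Source B: state (begin, ending, found_begin, found_ending), early break
def pvBLoop : List (Int × String) → Int → Int → Bool → Bool → Int × Int
  | [], b, e, _, _ => (b, e)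
  | (i, line) :: rest, b, e, fb, fe =>
    let s1 : Int × Bool :=
      if !fb && PySem.Str.isIn "TOTAL-FORCE" line then (i + 2, true) else (b, fb)
    let s2 : Int × Bool :=
      if !fe && PySem.Str.isIn "total drift:" line then (i - 1, true) else (e, fe)
    if s1.2 && s2.2 then (s1.1, s2.1) else pvBLoop rest s1.1 s2.1 s1.2 s2.2

def findPositionForce_alt (outcar : List String) : List Int :=
  let r := pvBLoop (PySem.List.enumerate outcar).reverse 0 0 false false
  [r.1, r.2]

-- ===== PRECONDITION & SPEC =====
def Spec_findPositionForce (outcar : List String) (out : List Int) : Prop := out = findPositionForce_alt outcar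
instance (outcar : List String) (out : List Int) : Decidable (Spec_findPositionForce outcar out) := by unfold Spec_findPositionForce; infer_instance

-- ===== CLAIM (what is proved, stated in full; the proofs are below) =====
def Claim_equal_findPositionForce : Prop := ∀ (outcar : List String), Dom_findPositionForce outcar → Spec_findPositionForce outcar (findPositionForce outcar)

-- ===== LEMMAS AND PROOFS =====

-- A's forward pass with "last match wins" equals applying f to the last pair whose
-- snd satisfies c (default b0 if none).
theorem pv_foldl_lastwins (c : String → Bool) (f : Int → Int) (l : List (Int × String))
    (b0 : Int) :
    l.foldl (fun b p => if c p.2 then f p.1 else b) b0 =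
      (match (l.filter (fun p => c p.2)).getLast? with
       | none => b0
       | some p => f p.1) := by
  induction l using List.reverseRecOn generalizing b0 with
  | nil => simp
  | append_singleton l p ih =>
    rw [List.foldl_append, List.filter_append]
    by_cases h : c p.2 = true
    · simp [h]
    · simp only [List.filter_cons, h, Bool.false_eq_true, if_false, List.filter_nil,
        List.append_nil, List.foldl_cons, List.foldl_nil, if_neg h]
      exact ih b0

-- B's backward loop with "first match wins" and early break: characterization.
theorem pv_bLoop_eq (l : List (Int × String)) :
    ∀ (b e : Int) (fb fe : Bool),
    pvBLoop l b e fb fe =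
      ((if fb then b else
          match (l.filter (fun p => PySem.Str.isIn "TOTAL-FORCE" p.2)).head? with
          | none => b
          | some p => p.1 + 2),
       (if fe then e else
          match (l.filter (fun p => PySem.Str.isIn "total drift:" p.2)).head? with
          | none => e
          | some p => p.1 - 1)) := by
  induction l with
  | nil => intro b e fb fe; cases fb <;> cases fe <;> simp [pvBLoop]
  | cons hd tl ih =>
    intro b e fb fe
    obtain ⟨i, line⟩ := hd
    by_cases h1 : PySem.Str.isIn "TOTAL-FORCE" line = true <;>
      by_cases h2 : PySem.Str.isIn "total drift:" line = true <;>
        cases fb <;> cases fe <;>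
          simp only [pvBLoop, ih, List.filter_cons, h1, h2, Bool.not_false, Bool.not_true,
            Bool.false_and, Bool.true_and, Bool.and_false, Bool.and_true, Bool.and_self,
            if_true, if_false, Bool.false_eq_true, List.head?_cons, ite_true, ite_false] <;>
          simp only [pvBLoop, ih, List.filter_cons, h1, h2, Bool.false_eq_true, if_false,
            if_true, List.head?_cons]

theorem findPositionForce_eq_alt (outcar : List String) :
    findPositionForce outcar = findPositionForce_alt outcar := by
  unfold findPositionForce findPositionForce_alt
  rw [pv_bLoop_eq]
  rw [pv_foldl_lastwins (fun s => PySem.Str.isIn "TOTAL-FORCE" s) (fun i => i + 2)]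
  rw [pv_foldl_lastwins (fun s => PySem.Str.isIn "total drift:" s) (fun i => i - 1)]
  simp [List.filter_reverse, List.head?_reverse]

-- ===== VERDICT (by name: the statement is the Claim_ definition above) =====
theorem findPositionForce_spec : Claim_equal_findPositionForce := by
  intro outcar _
  unfold Spec_findPositionForce
  exact findPositionForce_eq_alt outcar
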